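-- pv_equiv track=rewrite | github.com/biopharmaai/Madrigal | novelddi/chemcpa/chemcpa_config_utils.py | cartesian_product_zipped_dict
-- ===== SOURCE A (Python) =====
-- from itertools import combinations, product
--
-- def cartesian_product_zipped_dict(zipped_dict):
--     """Compute the Cartesian product of the ziped input dictionary values.
--     Parameters
--     ----------
--     zipped_dict: dict of dicts of lists
--
--     Returns
--     -------
--     list of dicts
--         Cartesian product of the lists in the input dictionary.
--
--     """
--     zip_lengths = {
--         k: len(next(iter(bundle.values())))
--         for k, bundle in zipped_dict.items()
--     }
--
--     for idx in product(*[range(k) for k in zip_lengths.values()]):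
--         yield {
--             key: values[i]
--             for zip_id, i in zip(zipped_dict, idx)
--             for key, values in zipped_dict[zip_id].items()
--         }
-- ===== SOURCE B (Python) =====
-- def cartesian_product_zipped_dict(zipped_dict):
--     """Cartesian product of zipped dict bundles via one mixed-radix counter (generator of dicts)."""
--     bundles = list(zipped_dict.values())
--     lengths = [len(next(iter(b.values()))) for b in bundles]
--     total = 1
--     for L in lengths:
--         total *= L
--     for n in range(total):
--         idxs = [0] * len(lengths)
--         rem = n
--         for pos in range(len(lengths) - 1, -1, -1):
--             rem, idxs[pos] = divmod(rem, lengths[pos])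
--         out = {}
--         for bundle, i in zip(bundles, idxs):
--             for key, values in bundle.items():
--                 out[key] = values[i]
--         yield out
-- ===== Notes on version B (the rewrite author's own statement) =====
-- stated objective: alternative
-- what changed: B drops itertools.product entirely: it runs one loop n in range(total) over a single mixed-radix counter and decodes n into per-bundle indices with divmod, while A iterates product() of per-bundle index ranges and rebuilds each dict by re-zipping keys with dict lookups.
import Mathlib
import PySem

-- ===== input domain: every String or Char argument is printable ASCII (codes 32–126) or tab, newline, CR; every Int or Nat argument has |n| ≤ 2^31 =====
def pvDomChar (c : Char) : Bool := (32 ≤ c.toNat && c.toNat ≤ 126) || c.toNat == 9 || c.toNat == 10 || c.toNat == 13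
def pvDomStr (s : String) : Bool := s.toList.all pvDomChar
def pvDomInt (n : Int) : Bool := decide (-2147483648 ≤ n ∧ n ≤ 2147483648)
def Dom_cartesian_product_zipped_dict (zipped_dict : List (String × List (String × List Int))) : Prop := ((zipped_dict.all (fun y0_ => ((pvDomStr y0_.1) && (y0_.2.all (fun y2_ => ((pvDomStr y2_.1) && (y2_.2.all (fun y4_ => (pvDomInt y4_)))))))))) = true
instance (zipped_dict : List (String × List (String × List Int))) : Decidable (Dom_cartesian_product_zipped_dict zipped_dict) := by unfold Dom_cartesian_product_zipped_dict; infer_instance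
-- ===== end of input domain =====

-- B replaces A's itertools.product over per-bundle index ranges (with key re-zipping and dict
-- lookups per combo) by one mixed-radix counter n in range(total), decoded into per-bundle
-- indices by divmod (objective: alternative).
-- Both A and B are Python generators; equivalence is about the yielded sequence, materialized as a list.

-- ===== PORT A =====

-- len(next(iter(bundle.values()))) — length of the first value list of a bundle (Pre_ excludes empty bundles)
def pvFirstLen (b : List (String × List Int)) : Nat :=
  match b with
  | [] => 0
  | kv :: _ => kv.2.length

-- itertools.product(*lists) in itertools order (first factor varies slowest)
def pvProd {α : Type} : List (List α) → List (List α)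
  | [] => [[]]
  | xs :: rest => xs.flatMap (fun x => (pvProd rest).map (fun t => x :: t))

-- zipped_dict[zip_id] — first-match lookup (Pre_ excludes duplicate outer keys, impossible for a Python dict)
def pvLookup (zd : List (String × List (String × List Int))) (k : String) : List (String × List Int) :=
  ((zd.find? (fun p => p.1 == k)).map (·.2)).getD []

def cartesian_product_zipped_dict (zipped_dict : List (String × List (String × List Int))) : List (List (String × Int)) :=
  let zip_lengths : List (String × Nat) := zipped_dict.map (fun kb => (kb.1, pvFirstLen kb.2))
  (pvProd (zip_lengths.map (fun p => List.range p.2))).map (fun idx =>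
    (((zipped_dict.map (·.1)).zip idx).foldl (fun d p =>
        (pvLookup zipped_dict p.1).foldl (fun d kv => d.insert kv.1 (kv.2.getD p.2 0)) d)
      (PySem.Dict.empty : PySem.Dict String Int)).items)

-- ===== PORT B =====

-- the descending divmod loop of Source B: processes `lengths` from the right, returning
-- (final rem, idxs); idxs[pos] = rem % lengths[pos] as the loop walks pos downward
def pvDecode : List Nat → Nat → Nat × List Nat
  | [], rem => (rem, [])
  | L :: rest, rem =>
      let p := pvDecode rest rem
      (p.1 / L, (p.1 % L) :: p.2)

def cartesian_product_zipped_dict_alt (zipped_dict : List (String × List (String × List Int))) : List (List (String × Int)) :=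
  let bundles := zipped_dict.map (·.2)
  let lengths := bundles.map pvFirstLen
  let total := lengths.foldl (· * ·) 1
  (List.range total).map (fun n =>
    ((bundles.zip (pvDecode lengths n).2).foldl (fun d p =>
        p.1.foldl (fun d kv => d.insert kv.1 (kv.2.getD p.2 0)) d)
      (PySem.Dict.empty : PySem.Dict String Int)).items)

-- ===== PRECONDITION & SPEC =====
-- Pre_ excludes: duplicate outer keys (impossible for a real Python dict argument), empty bundles
-- (both A and B raise RuntimeError via StopIteration) and bundles with a value list shorter than
-- the first one (both raise IndexError).
def Pre_cartesian_product_zipped_dict (zipped_dict : List (String × List (String × List Int))) : Prop :=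
  (zipped_dict.map (·.1)).Nodup ∧
  ∀ kb ∈ zipped_dict, kb.2 ≠ [] ∧ ∀ kv ∈ kb.2, pvFirstLen kb.2 ≤ kv.2.length

instance (zipped_dict : List (String × List (String × List Int))) : Decidable (Pre_cartesian_product_zipped_dict zipped_dict) := by unfold Pre_cartesian_product_zipped_dict; infer_instance

def pvWitness_cartesian_product_zipped_dict : (List (String × List (String × List Int))) :=
  [("a", [("x", [1, 2]), ("y", [3, 4])]), ("b", [("z", [5])])]

def Spec_cartesian_product_zipped_dict (zipped_dict : List (String × List (String × List Int))) (out : List (List (String × Int))) : Prop := out = cartesian_product_zipped_dict_alt zipped_dict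
instance (zipped_dict : List (String × List (String × List Int))) (out : List (List (String × Int))) : Decidable (Spec_cartesian_product_zipped_dict zipped_dict out) := by unfold Spec_cartesian_product_zipped_dict; infer_instance

-- ===== CLAIM (what is proved, stated in full; the proofs are below) =====
def Claim_equal_cartesian_product_zipped_dict : Prop := ∀ (zipped_dict : List (String × List (String × List Int))), Dom_cartesian_product_zipped_dict zipped_dict → Pre_cartesian_product_zipped_dict zipped_dict → Spec_cartesian_product_zipped_dict zipped_dict (cartesian_product_zipped_dict zipped_dict)

-- ===== LEMMAS AND PROOFS =====

-- product of a list of radices (right fold)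
def pvTotal (l : List Nat) : Nat := l.foldr (· * ·) 1

theorem pvFoldl_mul (l : List Nat) (a : Nat) : l.foldl (· * ·) a = a * pvTotal l := by
  induction l generalizing a with
  | nil => simp [pvTotal]
  | cons L rest ih =>
      simp only [List.foldl_cons, pvTotal, List.foldr_cons] at *
      rw [ih (a * L)]
      ring

-- divmod decoding splits off a multiple of the full radix product
theorem pvDecode_shift :
    ∀ (rest : List Nat) (q j : Nat), j < pvTotal rest →
      pvDecode rest (q * pvTotal rest + j) = (q, (pvDecode rest j).2) := by
  intro rest
  induction rest with
  | nil =>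
      intro q j hj
      have hj0 : j = 0 := by simpa [pvTotal] using hj
      subst hj0
      simp [pvDecode, pvTotal]
  | cons M rs ih =>
      intro q j hj
      have hMP : pvTotal (M :: rs) = M * pvTotal rs := rfl
      rw [hMP] at hj ⊢
      set P' := pvTotal rs with hP'
      have hP'pos : 0 < P' := by
        rcases Nat.eq_zero_or_pos P' with h | h
        · rw [h, Nat.mul_zero] at hj; omega
        · exact h
      have hdiv : j / P' < M := Nat.div_lt_of_lt_mul (by rwa [Nat.mul_comm] at hj)
      have hmod : j % P' < P' := Nat.mod_lt _ hP'pos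
      have harg : q * (M * P') + j = (q * M + j / P') * P' + j % P' := by
        conv_rhs => rw [Nat.add_mul, Nat.mul_comm (j / P') P', Nat.add_assoc, Nat.div_add_mod]
        ring
      have hj2 : j = (j / P') * P' + j % P' := by
        conv_rhs => rw [Nat.mul_comm, Nat.div_add_mod]
      have h1 : pvDecode rs (q * (M * P') + j) = (q * M + j / P', (pvDecode rs (j % P')).2) := by
        rw [harg]; exact ih _ _ hmod
      have h2 : pvDecode rs j = (j / P', (pvDecode rs (j % P')).2) := by
        conv_lhs => rw [hj2]
        exact ih _ _ hmod
      have hM : 0 < M := lt_of_le_of_lt (Nat.zero_le _) hdiv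
      simp only [pvDecode, h1, h2]
      rw [Nat.mul_comm q M, Nat.mul_add_div hM, Nat.mul_add_mod,
          Nat.div_eq_of_lt hdiv, Nat.add_zero]

-- range (L*P) enumerated blockwise
theorem pvRange_mul (L P : Nat) :
    List.range (L * P) = (List.range L).flatMap (fun i => (List.range P).map (fun j => i * P + j)) := by
  induction L with
  | zero => simp
  | succ L ih =>
      rw [Nat.succ_mul, List.range_add, ih, List.range_succ, List.flatMap_append]
      simp [Nat.mul_comm]

-- the counter enumeration equals itertools.product of the ranges
theorem pvRangeDecode :
    ∀ (lengths : List Nat),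
      (List.range (pvTotal lengths)).map (fun n => (pvDecode lengths n).2)
        = pvProd (lengths.map List.range) := by
  intro lengths
  induction lengths with
  | nil => simp [pvTotal, pvDecode, pvProd]
  | cons L rest ih =>
      have hP : pvTotal (L :: rest) = L * pvTotal rest := rfl
      rw [hP, pvRange_mul, List.map_flatMap]
      simp only [List.map_cons, pvProd]
      rw [← ih]
      apply List.flatMap_congr
      intro i hi
      have hiL : i < L := List.mem_range.mp hi
      rw [List.map_map, List.map_map]
      apply List.map_congr_left
      intro j hj
      have hjP : j < pvTotal rest := List.mem_range.mp hj
      simp only [Function.comp_apply]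
      show (pvDecode (L :: rest) (i * pvTotal rest + j)).2 = i :: (pvDecode rest j).2
      simp only [pvDecode, pvDecode_shift rest i j hjP]
      rw [Nat.mod_eq_of_lt hiL]

-- A's product of ranges enumerated by the counter, composed with any postprocessing
theorem pvMapDecode {β : Type} (lengths : List Nat) (g : List Nat → β) :
    (List.range (pvTotal lengths)).map (fun n => g (pvDecode lengths n).2)
      = (pvProd (lengths.map List.range)).map g := by
  rw [← pvRangeDecode, List.map_map]
  rfl

-- first-match lookup on a Nodup-keyed assoc list
theorem pvLookup_eq (zd : List (String × List (String × List Int)))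
    (hnd : (zd.map (·.1)).Nodup) :
    ∀ k b, (k, b) ∈ zd → pvLookup zd k = b := by
  induction zd with
  | nil => intro k b h; simp at h
  | cons p rest ih =>
      intro k b hmem
      simp only [List.map_cons, List.nodup_cons] at hnd
      rcases List.mem_cons.mp hmem with h | h
      · cases h
        simp [pvLookup, List.find?]
      · have hk : p.1 ≠ k := by
          intro he
          exact hnd.1 (he ▸ (List.mem_map.mpr ⟨(k, b), h, rfl⟩))
        have : pvLookup rest k = b := ih hnd.2 k b h
        simpa [pvLookup, List.find?_cons, beq_iff_eq, hk] using this

-- A's lookup-driven fold equals B's direct fold over the bundles, given Nodup outer keys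
theorem pvFold_eq (zd : List (String × List (String × List Int)))
    (hnd : (zd.map (·.1)).Nodup) (idx : List Nat) (d : PySem.Dict String Int) :
    ((zd.map (·.1)).zip idx).foldl (fun d p =>
        (pvLookup zd p.1).foldl (fun d kv => d.insert kv.1 (kv.2.getD p.2 0)) d) d
      = ((zd.map (·.2)).zip idx).foldl (fun d p =>
          p.1.foldl (fun d kv => d.insert kv.1 (kv.2.getD p.2 0)) d) d := by
  rw [List.zip_map_left, List.foldl_map, List.zip_map_left, List.foldl_map]
  apply PySem.List.foldl_congr_mem
  intro acc q hq
  have hq1 : q.1 ∈ zd := (List.of_mem_zip hq).1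
  simp only [Prod.map_fst, Prod.map_snd, id_eq]
  rw [pvLookup_eq zd hnd q.1.1 q.1.2 (by simpa using hq1)]

-- ===== VERDICT (by name: the statement is the Claim_ definition above) =====
theorem cartesian_product_zipped_dict_spec : Claim_equal_cartesian_product_zipped_dict := by
  intro zd _ hpre
  show cartesian_product_zipped_dict zd = cartesian_product_zipped_dict_alt zd
  unfold cartesian_product_zipped_dict cartesian_product_zipped_dict_alt
  simp only [List.map_map]
  rw [pvFoldl_mul, one_mul]
  have hB := pvMapDecode (List.map (pvFirstLen ∘ fun x => x.2) zd)
      (fun idx => ((List.map (fun x => x.2) zd).zip idx).foldl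
        (fun d p => p.1.foldl (fun d kv => d.insert kv.1 (kv.2.getD p.2 0)) d)
        (PySem.Dict.empty : PySem.Dict String Int) |>.items)
  refine Eq.trans ?_ hB.symm
  rw [List.map_map]
  simp only [Function.comp_def]
  exact List.map_congr_left fun idx _ => by rw [pvFold_eq zd hpre.1]
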